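-- pv_equiv track=rewrite | github.com/vercah/computational-geometry | geometry.py | get_inflex_points
-- ===== SOURCE A (Python) =====
-- def is_side_correct(start, end, checked, clockwise): # check using vectors and cross product
--     v1 = (end[0] - start[0], end[1] - start[1])
--     v2 = (checked[0] - start[0], checked[1] - start[1])
--     cross_product = v1[0] * v2[1] - v1[1] * v2[0]
--     if (cross_product < 0 and clockwise) or (cross_product > 0 and not clockwise):
--         return True
--     return False
--
-- def is_clockwise(polygon):
--     left = 0
--     right = 0
--     for i in range(len(polygon)):
--         if is_side_correct(polygon[i%len(polygon)], polygon[(i+2)%len(polygon)], polygon[(i+1)%len(polygon)], True):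
--             left += 1
--         else:
--             right += 1
--     if left > right:
--         return True
--     return False
--
-- def get_inflex_points(my_polygon):
--     inflexes = [] # stores the inflex points from the polygon
--     going_clockwise = False
--     if is_clockwise(my_polygon):
--         going_clockwise = True
--     for i in range(len(my_polygon)):
--         if not is_side_correct(my_polygon[i], my_polygon[(i+2)%(len(my_polygon))], my_polygon[(i+1)%(len(my_polygon))], going_clockwise):
--             inflexes.append(my_polygon[(i+1)%(len(my_polygon))])
--     return inflexes
-- ===== SOURCE B (Python) =====
-- def get_inflex_points(my_polygon):
--     n = len(my_polygon)
--     rot1 = my_polygon[1:] + my_polygon[:1]   # vertex i+1 (mod n)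
--     rot2 = my_polygon[2:] + my_polygon[:2]   # vertex i+2 (mod n)
--     neg = 0        # turns with negative cross product (clockwise votes)
--     if_cw = []     # answer if the polygon turns out clockwise
--     if_ccw = []    # answer otherwise
--     for a, b, c in zip(my_polygon, rot2, rot1):
--         cross = (b[0] - a[0]) * (c[1] - a[1]) - (b[1] - a[1]) * (c[0] - a[0])
--         if cross < 0:
--             neg += 1
--             if_ccw.append(c)
--         elif cross > 0:
--             if_cw.append(c)
--         else:
--             if_cw.append(c)
--             if_ccw.append(c)
--     return if_cw if 2 * neg > n else if_ccw
-- ===== Notes on version B (the rewrite author's own statement) =====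
-- stated objective: alternative
-- what changed: A makes two index-driven passes (a helper-based orientation vote, then a second helper-based inflex scan); B makes one pass over a zip of the vertex list with its two rotations, simultaneously building both candidate answers (clockwise and counter-clockwise) plus the negative-cross count, and selects one candidate at the end.
import Mathlib
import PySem

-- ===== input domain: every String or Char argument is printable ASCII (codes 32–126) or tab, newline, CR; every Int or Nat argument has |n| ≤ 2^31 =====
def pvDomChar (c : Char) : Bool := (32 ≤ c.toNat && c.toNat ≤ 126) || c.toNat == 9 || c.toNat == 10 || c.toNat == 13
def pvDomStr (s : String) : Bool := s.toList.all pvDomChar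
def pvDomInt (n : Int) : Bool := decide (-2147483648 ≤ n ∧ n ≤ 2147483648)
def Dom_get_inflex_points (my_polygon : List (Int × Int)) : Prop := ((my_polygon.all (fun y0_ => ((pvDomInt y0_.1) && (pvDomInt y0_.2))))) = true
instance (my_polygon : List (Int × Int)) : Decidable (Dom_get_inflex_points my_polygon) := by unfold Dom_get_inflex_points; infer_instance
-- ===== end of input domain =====

-- B replaces A's two index-driven passes (orientation vote pass, then inflex pass, each calling
-- the helper) by one zip over two rotations of the vertex list that builds both candidate answers
-- at once and selects one at the end. Objective: alternative decomposition.

-- ===== PORT A =====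
-- every index A reads is i % n (or i with 0 ≤ i < n) over the loop range, hence in range:
-- pyGetD with a dummy default is exact here.
def is_side_correct (start e checked : Int × Int) (clockwise : Bool) : Bool :=
  let v1 := (e.1 - start.1, e.2 - start.2)
  let v2 := (checked.1 - start.1, checked.2 - start.2)
  let cross_product := v1.1 * v2.2 - v1.2 * v2.1
  if (decide (cross_product < 0) && clockwise) || (decide (cross_product > 0) && !clockwise) then true
  else false

def is_clockwise (polygon : List (Int × Int)) : Bool :=
  let n : Int := polygon.length
  let lr := (PySem.List.pyRange 0 n 1).foldl (fun (lr : Int × Int) i =>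
    if is_side_correct (PySem.List.pyGetD polygon (PySem.Int.mod i n) (0,0))
        (PySem.List.pyGetD polygon (PySem.Int.mod (i+2) n) (0,0))
        (PySem.List.pyGetD polygon (PySem.Int.mod (i+1) n) (0,0)) true
    then (lr.1 + 1, lr.2) else (lr.1, lr.2 + 1)) (0, 0)
  decide (lr.1 > lr.2)

def get_inflex_points (my_polygon : List (Int × Int)) : List (Int × Int) :=
  let n : Int := my_polygon.length
  let going_clockwise := is_clockwise my_polygon
  (PySem.List.pyRange 0 n 1).foldl (fun inflexes i =>
    if !(is_side_correct (PySem.List.pyGetD my_polygon i (0,0))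
          (PySem.List.pyGetD my_polygon (PySem.Int.mod (i+2) n) (0,0))
          (PySem.List.pyGetD my_polygon (PySem.Int.mod (i+1) n) (0,0)) going_clockwise)
    then inflexes ++ [PySem.List.pyGetD my_polygon (PySem.Int.mod (i+1) n) (0,0)] else inflexes) []

-- ===== PORT B =====
def get_inflex_points_alt (my_polygon : List (Int × Int)) : List (Int × Int) :=
  let n : Int := my_polygon.length
  let rot1 := PySem.List.slice my_polygon (some 1) none ++ PySem.List.slice my_polygon none (some 1)
  let rot2 := PySem.List.slice my_polygon (some 2) none ++ PySem.List.slice my_polygon none (some 2)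
  let s := (my_polygon.zip (rot2.zip rot1)).foldl
    (fun (s : Int × List (Int × Int) × List (Int × Int)) t =>
      let a := t.1
      let b := t.2.1
      let c := t.2.2
      let cross := (b.1 - a.1) * (c.2 - a.2) - (b.2 - a.2) * (c.1 - a.1)
      if cross < 0 then (s.1 + 1, s.2.1, s.2.2 ++ [c])
      else if cross > 0 then (s.1, s.2.1 ++ [c], s.2.2)
      else (s.1, s.2.1 ++ [c], s.2.2 ++ [c]))
    (0, [], [])
  if 2 * s.1 > n then s.2.1 else s.2.2

-- ===== PRECONDITION & SPEC =====
def Spec_get_inflex_points (my_polygon : List (Int × Int)) (out : List (Int × Int)) : Prop := out = get_inflex_points_alt my_polygon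
instance (my_polygon : List (Int × Int)) (out : List (Int × Int)) : Decidable (Spec_get_inflex_points my_polygon out) := by unfold Spec_get_inflex_points; infer_instance

-- ===== CLAIM (what is proved, stated in full; the proofs are below) =====
def Claim_equal_get_inflex_points : Prop := ∀ (my_polygon : List (Int × Int)), Dom_get_inflex_points my_polygon → Spec_get_inflex_points my_polygon (get_inflex_points my_polygon)

-- ===== LEMMAS AND PROOFS =====
def pvCross (poly : List (Int × Int)) (i : Int) : Int :=
  let a := PySem.List.pyGetD poly i (0,0)
  let b := PySem.List.pyGetD poly (PySem.Int.mod (i+2) (poly.length:Int)) (0,0)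
  let c := PySem.List.pyGetD poly (PySem.Int.mod (i+1) (poly.length:Int)) (0,0)
  (b.1 - a.1) * (c.2 - a.2) - (b.2 - a.2) * (c.1 - a.1)

def pvVert (poly : List (Int × Int)) (i : Int) : Int × Int :=
  PySem.List.pyGetD poly (PySem.Int.mod (i+1) (poly.length:Int)) (0,0)

lemma side_not (a b c : Int × Int) (cw : Bool) :
    (!(is_side_correct a b c cw))
      = ((cw && decide ((b.1-a.1)*(c.2-a.2) - (b.2-a.2)*(c.1-a.1) ≥ 0))
        || (!cw && decide ((b.1-a.1)*(c.2-a.2) - (b.2-a.2)*(c.1-a.1) ≤ 0))) := by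
  cases cw <;> simp [is_side_correct] <;> rw [← decide_not] <;> exact decide_eq_decide.mpr (by constructor <;> intro h <;> omega)

lemma side_true (a b c : Int × Int) :
    is_side_correct a b c true = decide ((b.1-a.1)*(c.2-a.2) - (b.2-a.2)*(c.1-a.1) < 0) := by
  simp [is_side_correct]

lemma foldl_pair_count (p : Int → Bool) (l : List Int) (a b : Int) :
    l.foldl (fun lr i => if p i then (lr.1 + 1, lr.2) else (lr.1, lr.2 + 1)) (a, b)
      = (a + l.countP p, b + l.countP (fun i => !p i)) := by
  induction l generalizing a b with
  | nil => simp
  | cons x xs ih => by_cases h : p x <;> simp [h, ih, Prod.ext_iff] <;> omega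

lemma countP_not_add {α : Type} (p : α → Bool) (l : List α) :
    l.countP p + l.countP (fun x => !p x) = l.length := by
  induction l with
  | nil => simp
  | cons x xs ih => by_cases h : p x <;> simp [h] <;> omega

lemma mod_self_of_range {i n : Int} (h0 : 0 ≤ i) (h1 : i < n) : PySem.Int.mod i n = i := by
  rw [PySem.Int.mod_eq_emod_of_pos (by omega)]; exact Int.emod_eq_of_lt h0 h1

-- A's orientation vote: clockwise iff strictly more than half of the crosses are negative.
lemma clockwise_eq (poly : List (Int × Int)) :
    is_clockwise poly
      = decide (2 * ((PySem.List.pyRange 0 (poly.length:Int) 1).countP (fun i => decide (pvCross poly i < 0)) : Int)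
              > (poly.length : Int)) := by
  simp only [is_clockwise]
  rw [foldl_pair_count]
  have e1 : (PySem.List.pyRange 0 (poly.length:Int) 1).countP
        (fun i => is_side_correct (PySem.List.pyGetD poly (PySem.Int.mod i (poly.length:Int)) (0,0))
          (PySem.List.pyGetD poly (PySem.Int.mod (i+2) (poly.length:Int)) (0,0))
          (PySem.List.pyGetD poly (PySem.Int.mod (i+1) (poly.length:Int)) (0,0)) true)
      = (PySem.List.pyRange 0 (poly.length:Int) 1).countP (fun i => decide (pvCross poly i < 0)) := by
    apply List.countP_congr
    intro i hi
    obtain ⟨h0, h1⟩ := PySem.List.mem_pyRange_one.mp hi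
    simp [side_true, mod_self_of_range h0 h1, pvCross]
  have e2 := countP_not_add
    (fun i => is_side_correct (PySem.List.pyGetD poly (PySem.Int.mod i (poly.length:Int)) (0,0))
          (PySem.List.pyGetD poly (PySem.Int.mod (i+2) (poly.length:Int)) (0,0))
          (PySem.List.pyGetD poly (PySem.Int.mod (i+1) (poly.length:Int)) (0,0)) true)
    (PySem.List.pyRange 0 (poly.length:Int) 1)
  rw [PySem.List.length_pyRange_one, e1] at e2
  simp only [zero_add, e1]
  exact decide_eq_decide.mpr (by constructor <;> intro h <;> omega)

-- A's output pass in filter/map form.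
lemma a_out_eq (poly : List (Int × Int)) (cw : Bool) :
    (PySem.List.pyRange 0 (poly.length:Int) 1).foldl (fun inflexes i =>
      if !(is_side_correct (PySem.List.pyGetD poly i (0,0))
            (PySem.List.pyGetD poly (PySem.Int.mod (i+2) (poly.length:Int)) (0,0))
            (PySem.List.pyGetD poly (PySem.Int.mod (i+1) (poly.length:Int)) (0,0)) cw)
      then inflexes ++ [PySem.List.pyGetD poly (PySem.Int.mod (i+1) (poly.length:Int)) (0,0)] else inflexes) []
    = ((PySem.List.pyRange 0 (poly.length:Int) 1).filter
        (fun i => (cw && decide (pvCross poly i ≥ 0)) || (!cw && decide (pvCross poly i ≤ 0)))).map (pvVert poly) := by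
  have h1 := PySem.List.foldl_append_if
    (fun i => (cw && decide (pvCross poly i ≥ 0)) || (!cw && decide (pvCross poly i ≤ 0)))
    (pvVert poly) (PySem.List.pyRange 0 (poly.length:Int) 1) []
  rw [List.nil_append] at h1
  rw [← h1]
  apply PySem.List.foldl_congr_mem
  intro acc i _
  rw [side_not]
  rfl

lemma rot_getElem (poly : List (Int × Int)) (j k : Nat) (hj : j ≤ poly.length) (hk : k < poly.length) :
    (poly.drop j ++ poly.take j)[k]'(by simp; omega) = poly[(k + j) % poly.length]'(Nat.mod_lt _ (by omega)) := by
  by_cases h : k < poly.length - j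
  · rw [List.getElem_append_left (by simp; omega)]
    rw [List.getElem_drop]
    congr 1
    rw [Nat.mod_eq_of_lt (by omega)]
    omega
  · rw [List.getElem_append_right (by simp; omega)]
    rw [List.getElem_take]
    congr 1
    simp only [List.length_drop]
    have : k + j = (k + j - poly.length) + 1 * poly.length := by omega
    rw [this, Nat.add_mul_mod_self_right, Nat.mod_eq_of_lt (by omega)]
    omega

-- the rotations, elementwise: the zipped triple list is the per-index triple over the range.
lemma zip_rot_eq (poly : List (Int × Int)) :
    poly.zip ((PySem.List.slice poly (some 2) none ++ PySem.List.slice poly none (some 2)).zip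
              (PySem.List.slice poly (some 1) none ++ PySem.List.slice poly none (some 1)))
    = (PySem.List.pyRange 0 (poly.length:Int) 1).map (fun i =>
        (PySem.List.pyGetD poly i (0,0),
         (PySem.List.pyGetD poly (PySem.Int.mod (i+2) (poly.length:Int)) (0,0),
          PySem.List.pyGetD poly (PySem.Int.mod (i+1) (poly.length:Int)) (0,0)))) := by
  rw [PySem.List.slice_from poly (a := (1:Int)) (by norm_num), PySem.List.slice_to poly (b := (1:Int)) (by norm_num),
      PySem.List.slice_from poly (a := (2:Int)) (by norm_num), PySem.List.slice_to poly (b := (2:Int)) (by norm_num)]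
  simp only [show ((1:Int).toNat) = 1 from rfl, show ((2:Int).toNat) = 2 from rfl]
  by_cases hn : poly.length ≤ 1
  · match poly, hn with
    | [], _ => rfl
    | [a], _ =>
      simp [PySem.List.pyRange_one, PySem.List.pyGetD, PySem.List.pyIdx?, PySem.List.pyGet?, PySem.Int.mod]
  · apply List.ext_getElem
    · simp [PySem.List.length_pyRange_one]
      omega
    · intro k hk1 hk2
      have hkn : k < poly.length := by
        simp at hk1
        omega
      rw [List.getElem_map, PySem.List.getElem_pyRange_one, List.getElem_zip, List.getElem_zip]
      have e1 := rot_getElem poly 1 k (by omega) hkn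
      have e2 := rot_getElem poly 2 k (by omega) hkn
      rw [e1, e2, zero_add]
      have g0 : PySem.List.pyGetD poly ((k:Nat):Int) (0,0) = poly[k] := by
        rw [PySem.List.pyGetD_natCast]; simp [hkn]
      have g1 : PySem.List.pyGetD poly (PySem.Int.mod ((k:Int)+1) (poly.length:Int)) (0,0)
          = poly[(k+1) % poly.length]'(Nat.mod_lt _ (by omega)) := by
        rw [PySem.Int.mod_eq_emod_of_pos (by omega)]
        have : ((k:Int)+1) % (poly.length:Int) = (((k+1) % poly.length : Nat) : Int) := by
          push_cast; rfl
        rw [this, PySem.List.pyGetD_natCast]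
        simp [Nat.mod_lt _ (show 0 < poly.length by omega)]
      have g2 : PySem.List.pyGetD poly (PySem.Int.mod ((k:Int)+2) (poly.length:Int)) (0,0)
          = poly[(k+2) % poly.length]'(Nat.mod_lt _ (by omega)) := by
        rw [PySem.Int.mod_eq_emod_of_pos (by omega)]
        have : ((k:Int)+2) % (poly.length:Int) = (((k+2) % poly.length : Nat) : Int) := by
          push_cast; rfl
        rw [this, PySem.List.pyGetD_natCast]
        simp [Nat.mod_lt _ (show 0 < poly.length by omega)]
      rw [g0, g1, g2]

-- the one-pass triple fold, characterised.
lemma fold3 (f : Int → Int) (v : Int → Int × Int) (l : List Int) (s : Int × List (Int × Int) × List (Int × Int)) :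
    l.foldl (fun s i =>
      if f i < 0 then (s.1 + 1, s.2.1, s.2.2 ++ [v i])
      else if f i > 0 then (s.1, s.2.1 ++ [v i], s.2.2)
      else (s.1, s.2.1 ++ [v i], s.2.2 ++ [v i])) s
    = (s.1 + (l.countP (fun i => decide (f i < 0)) : Int),
       s.2.1 ++ (l.filter (fun i => decide (f i ≥ 0))).map v,
       s.2.2 ++ (l.filter (fun i => decide (f i ≤ 0))).map v) := by
  induction l generalizing s with
  | nil => simp
  | cons x xs ih =>
    rcases s with ⟨n, cwl, ccwl⟩
    by_cases h1 : f x < 0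
    · simp [h1, ih, Prod.ext_iff, show ¬ (f x ≥ 0) by omega, show f x ≤ 0 by omega]; omega
    · by_cases h2 : f x > 0
      · simp [h1, h2, ih, show f x ≥ 0 by omega, show ¬ (f x ≤ 0) by omega]
      · simp [h1, h2, ih, show f x ≥ 0 by omega, show f x ≤ 0 by omega]

lemma ports_eq (poly : List (Int × Int)) : get_inflex_points poly = get_inflex_points_alt poly := by
  simp only [get_inflex_points, get_inflex_points_alt]
  rw [zip_rot_eq, List.foldl_map]
  have hb : (PySem.List.pyRange 0 (poly.length:Int) 1).foldl (fun (s : Int × List (Int × Int) × List (Int × Int)) i =>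
      if pvCross poly i < 0 then (s.1 + 1, s.2.1, s.2.2 ++ [pvVert poly i])
      else if pvCross poly i > 0 then (s.1, s.2.1 ++ [pvVert poly i], s.2.2)
      else (s.1, s.2.1 ++ [pvVert poly i], s.2.2 ++ [pvVert poly i])) (0, [], [])
      = ((((PySem.List.pyRange 0 (poly.length:Int) 1).countP (fun i => decide (pvCross poly i < 0)) : Int)),
         ((PySem.List.pyRange 0 (poly.length:Int) 1).filter (fun i => decide (pvCross poly i ≥ 0))).map (pvVert poly),
         ((PySem.List.pyRange 0 (poly.length:Int) 1).filter (fun i => decide (pvCross poly i ≤ 0))).map (pvVert poly)) := by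
    rw [fold3]; simp
  rw [show (fun (s : Int × List (Int × Int) × List (Int × Int)) i =>
      let a := PySem.List.pyGetD poly i (0,0)
      let b := PySem.List.pyGetD poly (PySem.Int.mod (i+2) (poly.length:Int)) (0,0)
      let c := PySem.List.pyGetD poly (PySem.Int.mod (i+1) (poly.length:Int)) (0,0)
      let cross := (b.1 - a.1) * (c.2 - a.2) - (b.2 - a.2) * (c.1 - a.1)
      if cross < 0 then (s.1 + 1, s.2.1, s.2.2 ++ [c])
      else if cross > 0 then (s.1, s.2.1 ++ [c], s.2.2)
      else (s.1, s.2.1 ++ [c], s.2.2 ++ [c]))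
    = (fun (s : Int × List (Int × Int) × List (Int × Int)) i =>
      if pvCross poly i < 0 then (s.1 + 1, s.2.1, s.2.2 ++ [pvVert poly i])
      else if pvCross poly i > 0 then (s.1, s.2.1 ++ [pvVert poly i], s.2.2)
      else (s.1, s.2.1 ++ [pvVert poly i], s.2.2 ++ [pvVert poly i])) from rfl]
  rw [hb, a_out_eq, clockwise_eq]
  by_cases hcw : 2 * (((PySem.List.pyRange 0 (poly.length:Int) 1).countP (fun i => decide (pvCross poly i < 0))) : Int) > (poly.length : Int)
  · rw [if_pos hcw]
    simp [hcw]
  · rw [if_neg hcw]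
    simp [hcw]

-- ===== VERDICT (by name: the statement is the Claim_ definition above) =====
theorem get_inflex_points_spec : Claim_equal_get_inflex_points := by
  intro my_polygon _
  unfold Spec_get_inflex_points
  exact ports_eq my_polygon
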